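-- pv_equiv track=rewrite | github.com/clearcompass-ai/ortholog-sdk | patch_destination_in_lifecycle.py | count_top_level_commas
-- ===== SOURCE A (Python) =====
-- def count_top_level_commas(args: str) -> int:
--     """Count commas at the top nesting level within an argument list."""
--     depth = 0
--     count = 0
--     i = 0
--     n = len(args)
--     while i < n:
--         c = args[i]
--         if c == '"':
--             i += 1
--             while i < n:
--                 if args[i] == '\\':
--                     i += 2
--                     continue
--                 if args[i] == '"':
--                     i += 1
--                     break
--                 i += 1
--             continue
--         if c == '`':
--             end = args.find('`', i + 1)
--             i = end + 1 if end != -1 else n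
--             continue
--         if c == "'":
--             i += 1
--             while i < n and args[i] != "'":
--                 if args[i] == '\\':
--                     i += 1
--                 i += 1
--             i += 1
--             continue
--         if c in '({[':
--             depth += 1
--         elif c in ')}]':
--             depth -= 1
--         elif c == ',' and depth == 0:
--             count += 1
--         i += 1
--     return count
-- ===== SOURCE B (Python) =====
-- def count_top_level_commas(args: str) -> int:
--     """Count commas at the top nesting level within an argument list.
--
--     Flat single-pass state machine: one character per step, a state in
--     {NORMAL, DOUBLE, SINGLE, BACKTICK} plus an escape flag.
--     """
--     NORMAL, DOUBLE, SINGLE, BACKTICK = 0, 1, 2, 3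
--     state = NORMAL
--     esc = False
--     depth = 0
--     count = 0
--     for c in args:
--         if state == NORMAL:
--             if c == '"':
--                 state = DOUBLE
--             elif c == "'":
--                 state = SINGLE
--             elif c == '`':
--                 state = BACKTICK
--             elif c in '({[':
--                 depth += 1
--             elif c in ')}]':
--                 depth -= 1
--             elif c == ',' and depth == 0:
--                 count += 1
--         elif state == BACKTICK:
--             if c == '`':
--                 state = NORMAL
--         else:  # DOUBLE or SINGLE: escapes honored
--             if esc:
--                 esc = False
--             elif c == '\\':
--                 esc = True
--             elif (state == DOUBLE and c == '"') or (state == SINGLE and c == "'"):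
--                 state = NORMAL
--     return count
-- ===== Notes on version B (the rewrite author's own statement) =====
-- stated objective: alternative
-- what changed: A's scanner with nested inner while-loops and variable index jumps is replaced by a flat single-pass state machine (state in {NORMAL, DOUBLE, SINGLE, BACKTICK} plus an escape flag) that advances exactly one character per step.
import Mathlib
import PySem

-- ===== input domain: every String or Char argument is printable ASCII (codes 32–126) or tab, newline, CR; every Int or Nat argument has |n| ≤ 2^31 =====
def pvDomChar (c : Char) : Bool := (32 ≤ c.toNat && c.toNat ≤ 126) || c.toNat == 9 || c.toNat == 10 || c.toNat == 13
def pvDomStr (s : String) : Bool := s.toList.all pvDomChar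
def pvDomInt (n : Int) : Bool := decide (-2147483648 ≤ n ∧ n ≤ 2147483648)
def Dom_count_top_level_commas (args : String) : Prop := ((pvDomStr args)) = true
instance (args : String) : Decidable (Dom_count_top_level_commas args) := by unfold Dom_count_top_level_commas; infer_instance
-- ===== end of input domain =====

-- B re-implements A's index-jumping scanner as a flat one-char-per-step state machine
-- (state + escape flag); same return value, alternative decomposition.

-- ===== PORT A =====
-- A's inner double-quote while loop: advance past the quoted content (escape skips 2 chars).
def aDouble : List Char → List Char
  | [] => []
  | c :: rest =>
    if c = '\\' then aDouble (rest.drop 1)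
    else if c = '"' then rest
    else aDouble rest
termination_by l => l.length
decreasing_by all_goals simp

-- A's backtick scan (args.find('`', i+1), no escapes).
def aBacktick : List Char → List Char
  | [] => []
  | c :: rest => if c = '`' then rest else aBacktick rest

-- A's single-quote while loop (terminator checked before the escape).
def aSingle : List Char → List Char
  | [] => []
  | c :: rest =>
    if c = '\'' then rest
    else if c = '\\' then aSingle (rest.drop 1)
    else aSingle rest
termination_by l => l.length
decreasing_by all_goals simp

-- the skipped segments are suffixes, so A's main loop terminates (cited by aLoop)
theorem aDouble_len : ∀ l : List Char, (aDouble l).length ≤ l.length := by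
  intro l
  induction l using aDouble.induct with
  | case1 => simp [aDouble]
  | case2 rest ih =>
      simp only [aDouble]
      refine le_trans ih ?_; simp; omega
  | case3 rest h => simp [aDouble]
  | case4 c rest h h2 ih =>
      simp only [aDouble, if_neg h, if_neg h2]
      exact le_trans ih (Nat.le_succ _)

theorem aSingle_len : ∀ l : List Char, (aSingle l).length ≤ l.length := by
  intro l
  induction l using aSingle.induct with
  | case1 => simp [aSingle]
  | case2 rest => simp [aSingle]
  | case3 rest h ih =>
      simp only [aSingle, if_neg h]
      refine le_trans ih ?_; simp; omega
  | case4 c rest h h2 ih =>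
      simp only [aSingle, if_neg h, if_neg h2]
      exact le_trans ih (Nat.le_succ _)

theorem aBacktick_len : ∀ l : List Char, (aBacktick l).length ≤ l.length := by
  intro l
  induction l with
  | nil => simp [aBacktick]
  | cons c rest ih =>
      simp only [aBacktick]
      split
      · exact Nat.le_succ _
      · exact le_trans ih (Nat.le_succ _)

-- A's main while loop.
def aLoop (depth count : Int) : List Char → Int
  | [] => count
  | c :: rest =>
    if c = '"' then aLoop depth count (aDouble rest)
    else if c = '`' then aLoop depth count (aBacktick rest)
    else if c = '\'' then aLoop depth count (aSingle rest)
    else if c = '(' ∨ c = '{' ∨ c = '[' then aLoop (depth + 1) count rest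
    else if c = ')' ∨ c = '}' ∨ c = ']' then aLoop (depth - 1) count rest
    else if c = ',' ∧ depth = 0 then aLoop depth (count + 1) rest
    else aLoop depth count rest
termination_by l => l.length
decreasing_by
  · exact Nat.lt_succ_of_le (aDouble_len rest)
  · exact Nat.lt_succ_of_le (aBacktick_len rest)
  · exact Nat.lt_succ_of_le (aSingle_len rest)
  all_goals simp

def count_top_level_commas (args : String) : Int := aLoop 0 0 args.toList

-- ===== PORT B =====
-- state: 0 = NORMAL, 1 = DOUBLE, 2 = SINGLE, 3 = BACKTICK; s = (state, esc, depth, count)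
def bStep (s : Nat × Bool × Int × Int) (c : Char) : Nat × Bool × Int × Int :=
  let (st, esc, d, cnt) := s
  if st = 0 then
    if c = '"' then (1, esc, d, cnt)
    else if c = '\'' then (2, esc, d, cnt)
    else if c = '`' then (3, esc, d, cnt)
    else if c = '(' ∨ c = '{' ∨ c = '[' then (0, esc, d + 1, cnt)
    else if c = ')' ∨ c = '}' ∨ c = ']' then (0, esc, d - 1, cnt)
    else if c = ',' ∧ d = 0 then (0, esc, d, cnt + 1)
    else (st, esc, d, cnt)
  else if st = 3 then
    if c = '`' then (0, esc, d, cnt) else (st, esc, d, cnt)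
  else
    if esc then (st, false, d, cnt)
    else if c = '\\' then (st, true, d, cnt)
    else if (st = 1 ∧ c = '"') ∨ (st = 2 ∧ c = '\'') then (0, esc, d, cnt)
    else (st, esc, d, cnt)

def count_top_level_commas_alt (args : String) : Int :=
  (args.toList.foldl bStep (0, false, 0, 0)).2.2.2

-- ===== PRECONDITION & SPEC =====
def Spec_count_top_level_commas (args : String) (out : Int) : Prop := out = count_top_level_commas_alt args
instance (args : String) (out : Int) : Decidable (Spec_count_top_level_commas args out) := by unfold Spec_count_top_level_commas; infer_instance

-- ===== CLAIM (what is proved, stated in full; the proofs are below) =====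
def Claim_equal_count_top_level_commas : Prop := ∀ (args : String), Dom_count_top_level_commas args → Spec_count_top_level_commas args (count_top_level_commas args)

-- ===== LEMMAS AND PROOFS =====

-- B in the DOUBLE state over l ends with the same count as B in NORMAL over A's skip.
theorem b_double : ∀ (l : List Char) (d cnt : Int),
    (List.foldl bStep (1, false, d, cnt) l).2.2.2
      = (List.foldl bStep (0, false, d, cnt) (aDouble l)).2.2.2 := by
  intro l
  induction l using aDouble.induct with
  | case1 => intro d cnt; simp [aDouble]
  | case2 rest ih =>
      intro d cnt
      cases rest with
      | nil => simp [aDouble, bStep]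
      | cons x r =>
          have he : aDouble ('\\' :: x :: r) = aDouble r := by simp [aDouble]
          have h1 : bStep (1, false, d, cnt) '\\' = (1, true, d, cnt) := by simp [bStep]
          have h2 : bStep (1, true, d, cnt) x = (1, false, d, cnt) := by simp [bStep]
          rw [he, List.foldl_cons, List.foldl_cons, h1, h2]
          exact ih d cnt
  | case3 rest h => intro d cnt; simp [aDouble, bStep]
  | case4 c rest h h2 ih =>
      intro d cnt
      have he : aDouble (c :: rest) = aDouble rest := by simp [aDouble, h, h2]
      have hs : bStep (1, false, d, cnt) c = (1, false, d, cnt) := by simp [bStep, h, h2]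
      rw [he, List.foldl_cons, hs]
      exact ih d cnt

theorem b_single : ∀ (l : List Char) (d cnt : Int),
    (List.foldl bStep (2, false, d, cnt) l).2.2.2
      = (List.foldl bStep (0, false, d, cnt) (aSingle l)).2.2.2 := by
  intro l
  induction l using aSingle.induct with
  | case1 => intro d cnt; simp [aSingle]
  | case2 rest => intro d cnt; simp [aSingle, bStep]
  | case3 rest h ih =>
      intro d cnt
      cases rest with
      | nil => simp [aSingle, bStep]
      | cons x r =>
          have he : aSingle ('\\' :: x :: r) = aSingle r := by simp [aSingle]
          have h1 : bStep (2, false, d, cnt) '\\' = (2, true, d, cnt) := by simp [bStep]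
          have h2 : bStep (2, true, d, cnt) x = (2, false, d, cnt) := by simp [bStep]
          rw [he, List.foldl_cons, List.foldl_cons, h1, h2]
          exact ih d cnt
  | case4 c rest h h2 ih =>
      intro d cnt
      have he : aSingle (c :: rest) = aSingle rest := by simp [aSingle, h, h2]
      have hs : bStep (2, false, d, cnt) c = (2, false, d, cnt) := by simp [bStep, h, h2]
      rw [he, List.foldl_cons, hs]
      exact ih d cnt

theorem b_backtick : ∀ (l : List Char) (d cnt : Int),
    (List.foldl bStep (3, false, d, cnt) l).2.2.2
      = (List.foldl bStep (0, false, d, cnt) (aBacktick l)).2.2.2 := by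
  intro l
  induction l with
  | nil => intro d cnt; simp [aBacktick]
  | cons c rest ih =>
      intro d cnt
      by_cases h : c = '`'
      · subst h; simp [aBacktick, bStep]
      · have he : aBacktick (c :: rest) = aBacktick rest := by simp [aBacktick, h]
        have hs : bStep (3, false, d, cnt) c = (3, false, d, cnt) := by simp [bStep, h]
        rw [he, List.foldl_cons, hs]
        exact ih d cnt

theorem main_eq : ∀ (d cnt : Int) (l : List Char),
    aLoop d cnt l = (List.foldl bStep (0, false, d, cnt) l).2.2.2 := by
  intro d cnt l
  induction d, cnt, l using aLoop.induct with
  | case1 d cnt => simp [aLoop]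
  | case2 d cnt rest ih =>
      have hs : bStep (0, false, d, cnt) '"' = (1, false, d, cnt) := by simp [bStep]
      calc aLoop d cnt ('"' :: rest) = aLoop d cnt (aDouble rest) := by simp [aLoop]
        _ = (List.foldl bStep (0, false, d, cnt) (aDouble rest)).2.2.2 := ih
        _ = (List.foldl bStep (1, false, d, cnt) rest).2.2.2 := (b_double rest d cnt).symm
        _ = _ := by rw [List.foldl_cons, hs]
  | case3 d cnt rest h1 ih =>
      have hs : bStep (0, false, d, cnt) '`' = (3, false, d, cnt) := by simp [bStep]
      calc aLoop d cnt ('`' :: rest) = aLoop d cnt (aBacktick rest) := by simp [aLoop]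
        _ = (List.foldl bStep (0, false, d, cnt) (aBacktick rest)).2.2.2 := ih
        _ = (List.foldl bStep (3, false, d, cnt) rest).2.2.2 := (b_backtick rest d cnt).symm
        _ = _ := by rw [List.foldl_cons, hs]
  | case4 d cnt rest h1 h2 ih =>
      have hs : bStep (0, false, d, cnt) '\'' = (2, false, d, cnt) := by simp [bStep]
      calc aLoop d cnt ('\'' :: rest) = aLoop d cnt (aSingle rest) := by simp [aLoop]
        _ = (List.foldl bStep (0, false, d, cnt) (aSingle rest)).2.2.2 := ih
        _ = (List.foldl bStep (2, false, d, cnt) rest).2.2.2 := (b_single rest d cnt).symm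
        _ = _ := by rw [List.foldl_cons, hs]
  | case5 d cnt c rest h1 h2 h3 h ih =>
      have hs : bStep (0, false, d, cnt) c = (0, false, d + 1, cnt) := by
        simp [bStep, h1, h2, h3, h]
      have ha : aLoop d cnt (c :: rest) = aLoop (d + 1) cnt rest := by
        simp [aLoop, h1, h2, h3, h]
      rw [ha, List.foldl_cons, hs]; exact ih
  | case6 d cnt c rest h1 h2 h3 h4 h ih =>
      have hs : bStep (0, false, d, cnt) c = (0, false, d - 1, cnt) := by
        simp [bStep, h1, h2, h3, h4, h]
      have ha : aLoop d cnt (c :: rest) = aLoop (d - 1) cnt rest := by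
        simp [aLoop, h1, h2, h3, h4, h]
      rw [ha, List.foldl_cons, hs]; exact ih
  | case7 d cnt c rest h1 h2 h3 h4 h5 h ih =>
      have hs : bStep (0, false, d, cnt) c = (0, false, d, cnt + 1) := by
        simp [bStep, h.1, h.2]
      have ha : aLoop d cnt (c :: rest) = aLoop d (cnt + 1) rest := by
        simp [aLoop, h.1, h.2]
      rw [ha, List.foldl_cons, hs]; exact ih
  | case8 d cnt c rest h1 h2 h3 h4 h5 h6 ih =>
      have hs : bStep (0, false, d, cnt) c = (0, false, d, cnt) := by
        simp [bStep, h1, h2, h3, h4, h5, h6]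
      have ha : aLoop d cnt (c :: rest) = aLoop d cnt rest := by
        simp [aLoop, h1, h2, h3, h4, h5, h6]
      rw [ha, List.foldl_cons, hs]; exact ih

-- ===== VERDICT (by name: the statement is the Claim_ definition above) =====
theorem count_top_level_commas_spec : Claim_equal_count_top_level_commas := by
  intro args _
  unfold Spec_count_top_level_commas count_top_level_commas count_top_level_commas_alt
  exact main_eq 0 0 args.toList
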